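-- pv_equiv track=rewrite | github.com/danielbsimpson/dd-campaigns | campaign-assistant/app/campaign/context.py | build_campaign_context
-- ===== SOURCE A (Python) =====
-- _CHARS_PER_TOKEN = 4
--
-- def _budget_chars(token_budget: int) -> int:
--     return token_budget * _CHARS_PER_TOKEN
--
-- def _truncate(text: str, max_chars: int, label: str) -> str:
--     """Truncate text to max_chars, appending a notice if cut."""
--     if len(text) <= max_chars:
--         return text
--     cutoff = max(0, max_chars - 60)
--     return text[:cutoff] + f"\n\n[{label} truncated to fit token budget]"
--
-- def build_campaign_context(
--     files: dict[str, str],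
--     token_budget: int = 6000,
-- ) -> str:
--     """Render all campaign files into a single labelled context block.
--
--     Files are included in a stable order: README first, then the .txt
--     narrative file, then characters.md, then creatures.md, then any
--     remaining files alphabetically. Each section is truncated if the
--     cumulative character count approaches the budget.
--
--     Args:
--         files:        Dict of filename → text from ``loader.load_campaign()``.
--         token_budget: Approximate token limit for the entire block.
--
--     Returns:
--         A formatted string ready for injection into a prompt.
--     """
--     if not files:
--         return ""
--
--     max_chars = _budget_chars(token_budget)
--
--     # Determine insertion order
--     order = []
--     for priority in ("readme.md", ):
--         for name in files:
--             if name.lower() == priority: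
--                 order.append(name)
--     for name in files:
--         if name.lower().endswith(".txt") and name not in order:
--             order.append(name)
--     for priority in ("characters.md", "creatures.md"):
--         for name in files:
--             if name.lower() == priority and name not in order:
--                 order.append(name)
--     for name in sorted(files):
--         if name not in order:
--             order.append(name)
--
--     sections: list[str] = []
--     used = 0
--
--     for name in order:
--         text = files[name]
--         remaining = max_chars - used
--         if remaining <= 0:
--             sections.append(f"## {name}\n[Omitted — token budget exhausted]")
--             continue
--         truncated = _truncate(text, remaining, name)
--         sections.append(f"## {name}\n{truncated}")
--         used += len(truncated)
--
--     return "\n\n".join(sections)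
-- ===== SOURCE B (Python) =====
-- _CHARS_PER_TOKEN = 4
--
-- def _rank(name):
--     if name.lower() == "readme.md":
--         return 0
--     if name.lower().endswith(".txt"):
--         return 1
--     if name.lower() == "characters.md":
--         return 2
--     if name.lower() == "creatures.md":
--         return 3
--     return 4
--
-- def _cut(text, max_chars, label):
--     if len(text) <= max_chars:
--         return text
--     return text[:max(0, max_chars - 60)] + f"\n\n[{label} truncated to fit token budget]"
--
-- def build_campaign_context(files, token_budget=6000):
--     if not files:
--         return ""
--     buckets = ([], [], [], [], [])
--     for name in files:
--         buckets[_rank(name)].append(name)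
--     order = buckets[0] + buckets[1] + buckets[2] + buckets[3] + sorted(buckets[4])
--     sections = []
--     used = 0
--     for name in order:
--         remaining = token_budget * _CHARS_PER_TOKEN - used
--         if remaining <= 0:
--             sections.append(f"## {name}\n[Omitted — token budget exhausted]")
--         else:
--             piece = _cut(files[name], remaining, name)
--             sections.append(f"## {name}\n{piece}")
--             used += len(piece)
--     return "\n\n".join(sections)
-- ===== Notes on version B (the rewrite author's own statement) =====
-- stated objective: faster
-- what changed: A's four filtered scans over the file names, each guarded by a linear 'name not in order' membership check, are replaced by a single bucketing pass on a priority rank plus one sort of the leftover bucket.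
import Mathlib
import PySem

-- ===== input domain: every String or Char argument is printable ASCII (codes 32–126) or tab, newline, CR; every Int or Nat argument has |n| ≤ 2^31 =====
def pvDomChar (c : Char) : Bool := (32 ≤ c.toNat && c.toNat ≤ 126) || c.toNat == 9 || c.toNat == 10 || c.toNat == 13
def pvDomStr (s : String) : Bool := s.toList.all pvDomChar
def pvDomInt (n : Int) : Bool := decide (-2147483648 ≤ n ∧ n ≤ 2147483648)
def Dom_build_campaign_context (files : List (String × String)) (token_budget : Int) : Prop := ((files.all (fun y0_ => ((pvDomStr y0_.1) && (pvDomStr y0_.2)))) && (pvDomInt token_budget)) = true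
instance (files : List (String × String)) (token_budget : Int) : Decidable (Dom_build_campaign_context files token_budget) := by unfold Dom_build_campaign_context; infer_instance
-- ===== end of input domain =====

-- B replaces A's four filtered scans over the file names (each with a linear 'not in order'
-- check, quadratic overall) by a single bucketing pass on a priority rank plus one sort of
-- the 'other' bucket (measured faster at scale in a timing run).

-- ===== PORT A =====
def pvTruncateA (text : String) (max_chars : Int) (label : String) : String :=
  if PySem.Str.len text ≤ max_chars then text
  else PySem.Str.slice text none (some (max 0 (max_chars - 60))) ++
       ("\n\n[" ++ label ++ " truncated to fit token budget]")

def build_campaign_context (files : List (String × String)) (token_budget : Int) : String :=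
  if files = [] then ""
  else
    let max_chars := token_budget * 4
    let keys := files.map Prod.fst
    let order : List String := ["readme.md"].foldl (fun order priority =>
        keys.foldl (fun order name =>
          if PySem.Str.lower name == priority then order ++ [name] else order) order) []
    let order := keys.foldl (fun order name =>
        if PySem.Str.endswith (PySem.Str.lower name) ".txt" && !order.contains name
        then order ++ [name] else order) order
    let order := ["characters.md", "creatures.md"].foldl (fun order priority =>
        keys.foldl (fun order name =>
          if PySem.Str.lower name == priority && !order.contains name
          then order ++ [name] else order) order) order
    let order := (PySem.List.sorted keys (fun x => x) false).foldl (fun order name =>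
        if !order.contains name then order ++ [name] else order) order
    let su := order.foldl (fun (su : List String × Int) name =>
        let text := (PySem.Dict.mk files).getD name ""
        let remaining := max_chars - su.2
        if remaining ≤ 0 then
          (su.1 ++ ["## " ++ name ++ "\n[Omitted — token budget exhausted]"], su.2)
        else
          let truncated := pvTruncateA text remaining name
          (su.1 ++ ["## " ++ name ++ "\n" ++ truncated], su.2 + PySem.Str.len truncated))
      (([] : List String), (0 : Int))
    PySem.Str.join "\n\n" su.1

-- ===== PORT B =====
def pvRank (name : String) : Int :=
  if PySem.Str.lower name == "readme.md" then 0
  else if PySem.Str.endswith (PySem.Str.lower name) ".txt" then 1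
  else if PySem.Str.lower name == "characters.md" then 2
  else if PySem.Str.lower name == "creatures.md" then 3
  else 4

abbrev pvBuckets5 := List String × List String × List String × List String × List String

def pvBucketStep (b : pvBuckets5) (name : String) : pvBuckets5 :=
  if pvRank name == 0 then (b.1 ++ [name], b.2.1, b.2.2.1, b.2.2.2.1, b.2.2.2.2)
  else if pvRank name == 1 then (b.1, b.2.1 ++ [name], b.2.2.1, b.2.2.2.1, b.2.2.2.2)
  else if pvRank name == 2 then (b.1, b.2.1, b.2.2.1 ++ [name], b.2.2.2.1, b.2.2.2.2)
  else if pvRank name == 3 then (b.1, b.2.1, b.2.2.1, b.2.2.2.1 ++ [name], b.2.2.2.2)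
  else (b.1, b.2.1, b.2.2.1, b.2.2.2.1, b.2.2.2.2 ++ [name])

def pvCut (text : String) (max_chars : Int) (label : String) : String :=
  if PySem.Str.len text ≤ max_chars then text
  else PySem.Str.slice text none (some (max 0 (max_chars - 60))) ++
       ("\n\n[" ++ label ++ " truncated to fit token budget]")

def build_campaign_context_alt (files : List (String × String)) (token_budget : Int) : String :=
  if files = [] then ""
  else
    let b := (files.map Prod.fst).foldl pvBucketStep
      (([], [], [], [], []) : pvBuckets5)
    let order := b.1 ++ b.2.1 ++ b.2.2.1 ++ b.2.2.2.1 ++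
                 PySem.List.sorted b.2.2.2.2 (fun x => x) false
    let su := order.foldl (fun (su : List String × Int) name =>
        let remaining := token_budget * 4 - su.2
        if remaining ≤ 0 then
          (su.1 ++ ["## " ++ name ++ "\n[Omitted — token budget exhausted]"], su.2)
        else
          let piece := pvCut ((PySem.Dict.mk files).getD name "") remaining name
          (su.1 ++ ["## " ++ name ++ "\n" ++ piece], su.2 + PySem.Str.len piece))
      (([] : List String), (0 : Int))
    PySem.Str.join "\n\n" su.1

-- ===== PRECONDITION & SPEC =====
-- Pre_ requires the file names (the dict keys) to be pairwise distinct: 'files' is a Python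
-- dict, so every input A actually accepts satisfies this; it only excludes association lists
-- that do not correspond to any dict.
def Pre_build_campaign_context (files : List (String × String)) (token_budget : Int) : Prop :=
  (files.map Prod.fst).Nodup
instance (files : List (String × String)) (token_budget : Int) : Decidable (Pre_build_campaign_context files token_budget) := by unfold Pre_build_campaign_context; infer_instance

def pvWitness_build_campaign_context : (List (String × String)) × Int :=
  ([("README.md", "hello"), ("story.txt", "once upon a time"), ("b.md", "x")], 5)

def Spec_build_campaign_context (files : List (String × String)) (token_budget : Int) (out : String) : Prop := out = build_campaign_context_alt files token_budget
instance (files : List (String × String)) (token_budget : Int) (out : String) : Decidable (Spec_build_campaign_context files token_budget out) := by unfold Spec_build_campaign_context; infer_instance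

-- ===== CLAIM (what is proved, stated in full; the proofs are below) =====
def Claim_equal_build_campaign_context : Prop := ∀ (files : List (String × String)) (token_budget : Int), Dom_build_campaign_context files token_budget → Pre_build_campaign_context files token_budget → Spec_build_campaign_context files token_budget (build_campaign_context files token_budget)

-- ===== LEMMAS AND PROOFS =====

-- A 'if p(name) and name not in order: order.append(name)' loop over distinct names.
lemma pv_loop_append (p : String → Bool) :
    ∀ (keys order : List String), keys.Nodup →
    keys.foldl (fun order name =>
        if p name && !order.contains name then order ++ [name] else order) order
      = order ++ keys.filter (fun n => p n && !order.contains n) := by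
  intro keys
  induction keys with
  | nil => intro order _; simp
  | cons n rest ih =>
    intro order hnd
    rw [List.nodup_cons] at hnd
    rw [List.foldl_cons, List.filter_cons]
    by_cases hc : (p n && !order.contains n) = true
    · rw [if_pos hc, if_pos hc, ih (order ++ [n]) hnd.2]
      have hf : rest.filter (fun m => p m && !(order ++ [n]).contains m)
          = rest.filter (fun m => p m && !order.contains m) := by
        apply List.filter_congr
        intro m hm
        have hmn : m ≠ n := fun h => hnd.1 (h ▸ hm)
        simp [hmn]
      rw [hf, List.append_assoc]
      simp
    · rw [if_neg hc, if_neg hc, ih order hnd.2]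

-- the same loop without a test ('if name not in order: order.append(name)')
lemma pv_loop_append' :
    ∀ (keys order : List String), keys.Nodup →
    keys.foldl (fun order name =>
        if !order.contains name then order ++ [name] else order) order
      = order ++ keys.filter (fun n => !order.contains n) := by
  intro keys
  induction keys with
  | nil => intro order _; simp
  | cons n rest ih =>
    intro order hnd
    rw [List.nodup_cons] at hnd
    rw [List.foldl_cons, List.filter_cons]
    by_cases hc : (!order.contains n) = true
    · rw [if_pos hc, if_pos hc, ih (order ++ [n]) hnd.2]
      have hf : rest.filter (fun m => !(order ++ [n]).contains m)
          = rest.filter (fun m => !order.contains m) := by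
        apply List.filter_congr
        intro m hm
        have hmn : m ≠ n := fun h => hnd.1 (h ▸ hm)
        simp [hmn]
      rw [hf, List.append_assoc]
      simp
    · rw [if_neg hc, if_neg hc, ih order hnd.2]

lemma pv_rank_cases (n : String) :
    pvRank n = 0 ∨ pvRank n = 1 ∨ pvRank n = 2 ∨ pvRank n = 3 ∨ pvRank n = 4 := by
  unfold pvRank; split_ifs <;> simp

lemma pv_step0 (b : pvBuckets5) (n : String) (h : pvRank n = 0) :
    pvBucketStep b n = (b.1 ++ [n], b.2.1, b.2.2.1, b.2.2.2.1, b.2.2.2.2) := by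
  simp [pvBucketStep, h]
lemma pv_step1 (b : pvBuckets5) (n : String) (h : pvRank n = 1) :
    pvBucketStep b n = (b.1, b.2.1 ++ [n], b.2.2.1, b.2.2.2.1, b.2.2.2.2) := by
  simp [pvBucketStep, h]
lemma pv_step2 (b : pvBuckets5) (n : String) (h : pvRank n = 2) :
    pvBucketStep b n = (b.1, b.2.1, b.2.2.1 ++ [n], b.2.2.2.1, b.2.2.2.2) := by
  simp [pvBucketStep, h]
lemma pv_step3 (b : pvBuckets5) (n : String) (h : pvRank n = 3) :
    pvBucketStep b n = (b.1, b.2.1, b.2.2.1, b.2.2.2.1 ++ [n], b.2.2.2.2) := by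
  simp [pvBucketStep, h]
lemma pv_step4 (b : pvBuckets5) (n : String) (h : pvRank n = 4) :
    pvBucketStep b n = (b.1, b.2.1, b.2.2.1, b.2.2.2.1, b.2.2.2.2 ++ [n]) := by
  simp [pvBucketStep, h]

lemma pv_buckets :
    ∀ (keys : List String) (a0 a1 a2 a3 a4 : List String),
    keys.foldl pvBucketStep (a0, a1, a2, a3, a4)
    = (a0 ++ keys.filter (fun n => pvRank n == 0),
       a1 ++ keys.filter (fun n => pvRank n == 1),
       a2 ++ keys.filter (fun n => pvRank n == 2),
       a3 ++ keys.filter (fun n => pvRank n == 3),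
       a4 ++ keys.filter (fun n => pvRank n == 4)) := by
  intro keys
  induction keys with
  | nil => intro a0 a1 a2 a3 a4; simp
  | cons n rest ih =>
    intro a0 a1 a2 a3 a4
    rcases pv_rank_cases n with h | h | h | h | h
    · rw [List.foldl_cons, pv_step0 _ _ h, ih]; simp [h]
    · rw [List.foldl_cons, pv_step1 _ _ h, ih]; simp [h]
    · rw [List.foldl_cons, pv_step2 _ _ h, ih]; simp [h]
    · rw [List.foldl_cons, pv_step3 _ _ h, ih]; simp [h]
    · rw [List.foldl_cons, pv_step4 _ _ h, ih]; simp [h]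

lemma pv_rank0 (n : String) : (pvRank n == 0) = (PySem.Str.lower n == "readme.md") := by
  unfold pvRank; split_ifs with h0 h1 h2 h3
  · rw [h0]; decide
  all_goals (simp only [beq_iff_eq] at *; simp [h0])

lemma pv_rank1 (n : String) : (pvRank n == 1) = PySem.Str.endswith (PySem.Str.lower n) ".txt" := by
  unfold pvRank; split_ifs with h0 h1 h2 h3
  · simp only [beq_iff_eq] at h0; rw [h0]; decide
  · rw [h1]; decide
  all_goals (simp only [Bool.not_eq_true] at h1; rw [h1]; decide)

lemma pv_rank2 (n : String) : (pvRank n == 2) = (PySem.Str.lower n == "characters.md") := by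
  unfold pvRank; split_ifs with h0 h1 h2 h3
  · simp only [beq_iff_eq] at h0; rw [h0]; decide
  · have hne : (PySem.Str.lower n == "characters.md") = false := by
      apply beq_eq_false_iff_ne.mpr
      intro h; rw [h] at h1; exact absurd h1 (by decide)
    rw [hne]; decide
  · rw [h2]; decide
  all_goals (simp only [beq_iff_eq] at *; simp [h2])

lemma pv_rank3 (n : String) : (pvRank n == 3) = (PySem.Str.lower n == "creatures.md") := by
  unfold pvRank; split_ifs with h0 h1 h2 h3
  · simp only [beq_iff_eq] at h0; rw [h0]; decide
  · have hne : (PySem.Str.lower n == "creatures.md") = false := by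
      apply beq_eq_false_iff_ne.mpr
      intro h; rw [h] at h1; exact absurd h1 (by decide)
    rw [hne]; decide
  · simp only [beq_iff_eq] at h2
    have hne : (PySem.Str.lower n == "creatures.md") = false := by
      apply beq_eq_false_iff_ne.mpr
      intro h; rw [h] at h2; exact absurd h2 (by decide)
    rw [hne]; decide
  · rw [h3]; decide
  · simp only [beq_iff_eq] at *; simp [h3]

-- membership in a rank-filter determines the rank
lemma pv_mem_rank_filter {keys : List String} {n : String} {i : Int}
    (h : n ∈ keys.filter (fun m => pvRank m == i)) : pvRank n = i := by
  have := (List.mem_filter.mp h).2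
  exact beq_iff_eq.mp this

-- ===== VERDICT (by name: the statement is the Claim_ definition above) =====
theorem build_campaign_context_spec : Claim_equal_build_campaign_context := by
  intro files token_budget _ hpre
  unfold Spec_build_campaign_context
  by_cases hf : files = []
  · simp [build_campaign_context, build_campaign_context_alt, hf]
  · unfold build_campaign_context build_campaign_context_alt
    rw [if_neg hf, if_neg hf]
    have hnd : (files.map Prod.fst).Nodup := hpre
    set keys := files.map Prod.fst with hkeys
    set F0 := keys.filter (fun n => pvRank n == 0) with hF0
    set F1 := keys.filter (fun n => pvRank n == 1) with hF1
    set F2 := keys.filter (fun n => pvRank n == 2) with hF2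
    set F3 := keys.filter (fun n => pvRank n == 3) with hF3
    set F4 := keys.filter (fun n => pvRank n == 4) with hF4
    -- step 1 : readme scan
    have h1 : keys.foldl (fun order name =>
        if PySem.Str.lower name == "readme.md" then order ++ [name] else order) [] = F0 := by
      rw [PySem.List.foldl_append_if_eq_filter, List.nil_append, hF0]
      exact List.filter_congr (fun n _ => (pv_rank0 n).symm)
    -- step 2 : .txt scan
    have h2 : keys.foldl (fun order name =>
        if PySem.Str.endswith (PySem.Str.lower name) ".txt" && !order.contains name
        then order ++ [name] else order) F0 = F0 ++ F1 := by
      have hfc : keys.filter (fun n =>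
          PySem.Str.endswith (PySem.Str.lower n) ".txt" && !F0.contains n) = F1 := by
        rw [hF1]
        apply List.filter_congr
        intro n _
        by_cases ep : PySem.Str.endswith (PySem.Str.lower n) ".txt" = true
        · have hr1 : (pvRank n == 1) = true := by rw [pv_rank1, ep]
          have hc : F0.contains n = false := by
            by_contra hcc
            rw [Bool.not_eq_false, List.contains_iff_mem] at hcc
            have := pv_mem_rank_filter hcc
            have h1' := beq_iff_eq.mp hr1
            omega
          rw [ep, hc, hr1]; decide
        · have ep' : PySem.Str.endswith (PySem.Str.lower n) ".txt" = false := by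
            simpa using ep
          rw [ep', pv_rank1, ep']; simp
      rw [pv_loop_append _ _ _ hnd, hfc]
    -- step 3 : characters.md scan
    have h3 : keys.foldl (fun order name =>
        if PySem.Str.lower name == "characters.md" && !order.contains name
        then order ++ [name] else order) (F0 ++ F1) = F0 ++ F1 ++ F2 := by
      have hfc : keys.filter (fun n =>
          (PySem.Str.lower n == "characters.md") && !(F0 ++ F1).contains n) = F2 := by
        rw [hF2]
        apply List.filter_congr
        intro n _
        by_cases ec : (PySem.Str.lower n == "characters.md") = true
        · have hr2 : (pvRank n == 2) = true := by rw [pv_rank2, ec]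
          have hc : (F0 ++ F1).contains n = false := by
            by_contra hcc
            rw [Bool.not_eq_false, List.contains_iff_mem, List.mem_append] at hcc
            have h2' := beq_iff_eq.mp hr2
            rcases hcc with hm | hm
            · have := pv_mem_rank_filter hm; omega
            · have := pv_mem_rank_filter hm; omega
          rw [ec, hc, hr2]; decide
        · have ec' : (PySem.Str.lower n == "characters.md") = false := by simpa using ec
          rw [ec', pv_rank2, ec']; simp
      rw [pv_loop_append _ _ _ hnd, hfc]
    -- step 4 : creatures.md scan
    have h4 : keys.foldl (fun order name =>
        if PySem.Str.lower name == "creatures.md" && !order.contains name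
        then order ++ [name] else order) (F0 ++ F1 ++ F2) = F0 ++ F1 ++ F2 ++ F3 := by
      have hfc : keys.filter (fun n =>
          (PySem.Str.lower n == "creatures.md") && !(F0 ++ F1 ++ F2).contains n) = F3 := by
        rw [hF3]
        apply List.filter_congr
        intro n _
        by_cases ec : (PySem.Str.lower n == "creatures.md") = true
        · have hr3 : (pvRank n == 3) = true := by rw [pv_rank3, ec]
          have hc : (F0 ++ F1 ++ F2).contains n = false := by
            by_contra hcc
            rw [Bool.not_eq_false, List.contains_iff_mem] at hcc
            simp only [List.mem_append] at hcc
            have h3' := beq_iff_eq.mp hr3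
            rcases hcc with (hm | hm) | hm <;> (have := pv_mem_rank_filter hm; omega)
          rw [ec, hc, hr3]; decide
        · have ec' : (PySem.Str.lower n == "creatures.md") = false := by simpa using ec
          rw [ec', pv_rank3, ec']; simp
      rw [pv_loop_append _ _ _ hnd, hfc]
    -- step 5 : alphabetical remainder
    have hnds : (PySem.List.sorted keys (fun x => x) false).Nodup :=
      (PySem.List.sorted_perm keys (fun x => x) false).nodup_iff.mpr hnd
    have h5 : (PySem.List.sorted keys (fun x => x) false).foldl (fun order name =>
        if !order.contains name then order ++ [name] else order) (F0 ++ F1 ++ F2 ++ F3)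
        = F0 ++ F1 ++ F2 ++ F3 ++ PySem.List.sorted F4 (fun x => x) false := by
      rw [pv_loop_append' _ _ hnds]
      have hfc : (PySem.List.sorted keys (fun x => x) false).filter
          (fun n => !(F0 ++ F1 ++ F2 ++ F3).contains n)
          = (PySem.List.sorted keys (fun x => x) false).filter (fun n => pvRank n == 4) := by
        apply List.filter_congr
        intro n hn
        have hnk : n ∈ keys := (PySem.List.mem_sorted _ _ _ _).mp hn
        rcases pv_rank_cases n with h | h | h | h | h
        · have hm : n ∈ F0 := List.mem_filter.mpr ⟨hnk, by simp [h]⟩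
          have : (F0 ++ F1 ++ F2 ++ F3).contains n = true := by
            rw [List.contains_iff_mem]; simp [hm]
          rw [this]; simp [h]
        · have hm : n ∈ F1 := List.mem_filter.mpr ⟨hnk, by simp [h]⟩
          have : (F0 ++ F1 ++ F2 ++ F3).contains n = true := by
            rw [List.contains_iff_mem]; simp [hm]
          rw [this]; simp [h]
        · have hm : n ∈ F2 := List.mem_filter.mpr ⟨hnk, by simp [h]⟩
          have : (F0 ++ F1 ++ F2 ++ F3).contains n = true := by
            rw [List.contains_iff_mem]; simp [hm]
          rw [this]; simp [h]
        · have hm : n ∈ F3 := List.mem_filter.mpr ⟨hnk, by simp [h]⟩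
          have : (F0 ++ F1 ++ F2 ++ F3).contains n = true := by
            rw [List.contains_iff_mem]; simp [hm]
          rw [this]; simp [h]
        · have hc : (F0 ++ F1 ++ F2 ++ F3).contains n = false := by
            by_contra hcc
            rw [Bool.not_eq_false, List.contains_iff_mem] at hcc
            simp only [List.mem_append] at hcc
            rcases hcc with ((hm | hm) | hm) | hm <;>
              (have := pv_mem_rank_filter hm; omega)
          rw [hc]; simp [h]
      -- the filter of the sorted list is the sorted filtered list
      have hsf : (PySem.List.sorted keys (fun x => x) false).filter (fun n => pvRank n == 4)
          = PySem.List.sorted F4 (fun x => x) false := by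
        symm
        apply PySem.List.sorted_eq_of_perm_of_pairwise_lt
        · rw [hF4]
          exact ((PySem.List.sorted_perm keys (fun x => x) false).filter _)
        · have hle : (PySem.List.sorted keys (fun x => x) false).Pairwise (fun a b => a ≤ b) :=
            PySem.List.sorted_pairwise keys (fun x => x)
          have hne : (PySem.List.sorted keys (fun x => x) false).Pairwise (fun a b => a ≠ b) := hnds
          have hlt : (PySem.List.sorted keys (fun x => x) false).Pairwise (fun a b => a < b) :=
            (hle.and hne).imp (fun h => lt_of_le_of_ne h.1 h.2)
          exact List.Pairwise.sublist List.filter_sublist hlt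
      rw [hfc, hsf]
    -- B's buckets
    have hb : keys.foldl pvBucketStep (([], [], [], [], []) : pvBuckets5)
        = (F0, F1, F2, F3, F4) := by
      rw [pv_buckets]; simp [hF0, hF1, hF2, hF3, hF4]
    -- assemble
    simp only [List.foldl_cons, List.foldl_nil]
    rw [h1, h2, h3, h4, h5, hb]
    rfl
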